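-- pv_equiv track=rewrite | github.com/xfx1993/goto1000 | test122.py | paintingPlan
-- ===== SOURCE A (Python) =====
-- def paintingPlan( n, k):
--     """
--     :type n: int
--     :type k: int
--     :rtype: int
--     """
--     if k==n*n:
--         return 1
--     count=0
--     def get(num):
--         num1 =1
--         for i in range(1,num+1):
--             num1 =num1*i
--         num2 =1
--         for j in range(n,n-num,-1):
--             num2=num2*j
--         return num2//num1
--
--     for i in range(0,n+1):
--         for j in range(0,n+1):
--            if i*n+j*n-i*j==k:
--                 if i==0 and j!=0:
--                     count += get(j)
--                 elif i!=0 and j==0: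
--                     count+=get(i)
--                 else:
--                     count += get(i)*get(j)
--     return count
-- ===== SOURCE B (Python) =====
-- def paintingPlan(n, k):
--     if k == n * n:
--         return 1
--     def comb(m):
--         c = 1
--         for t in range(m):
--             c = c * (n - t) // (t + 1)
--         return c
--     total = 0
--     for i in range(n + 1):
--         den = n - i
--         num = k - i * n
--         if den != 0 and num % den == 0:
--             j = num // den
--             if 0 <= j <= n:
--                 total += comb(i) * comb(j)
--     return total
-- ===== Notes on version B (the rewrite author's own statement) =====
-- stated objective: faster
-- what changed: Instead of scanning all (i,j) pairs and recomputing each binomial with an O(n) loop, B loops over i once, solves the linear equation i*n+j*n-i*j=k for j by exact division, and computes each binomial with the multiplicative formula, turning O(n^3) into O(n^2).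
import Mathlib
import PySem

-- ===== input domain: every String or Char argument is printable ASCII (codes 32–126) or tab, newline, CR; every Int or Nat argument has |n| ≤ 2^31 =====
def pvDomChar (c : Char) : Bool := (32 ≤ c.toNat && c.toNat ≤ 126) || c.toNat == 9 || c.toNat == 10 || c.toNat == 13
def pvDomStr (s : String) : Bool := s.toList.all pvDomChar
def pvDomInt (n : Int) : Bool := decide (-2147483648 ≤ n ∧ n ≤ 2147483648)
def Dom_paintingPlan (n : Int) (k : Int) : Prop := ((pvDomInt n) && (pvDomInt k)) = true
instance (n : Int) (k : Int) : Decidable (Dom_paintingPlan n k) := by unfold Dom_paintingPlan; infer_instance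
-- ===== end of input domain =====

-- B replaces A's scan over all pairs (i,j) (each term recomputing binomials with loops) by solving the
-- linear equation for j per i and the multiplicative binomial formula.

-- ===== PORT A =====
-- helper 'get(num)' of A: falling product over range(n, n-num, -1) floor-divided by num!
def pvGetA (n : Int) (num : Int) : Int :=
  let num1 := (PySem.List.pyRange 1 (num + 1) 1).foldl (fun a i => a * i) 1
  let num2 := (PySem.List.pyRange n (n - num) (-1)).foldl (fun a j => a * j) 1
  PySem.Int.floordiv num2 num1

def paintingPlan (n : Int) (k : Int) : Int :=
  if k = n * n then 1
  else
    (PySem.List.pyRange 0 (n + 1) 1).foldl (fun count i =>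
      (PySem.List.pyRange 0 (n + 1) 1).foldl (fun count j =>
        if i * n + j * n - i * j = k then
          if i = 0 ∧ j ≠ 0 then count + pvGetA n j
          else if i ≠ 0 ∧ j = 0 then count + pvGetA n i
          else count + pvGetA n i * pvGetA n j
        else count) count) 0

-- ===== PORT B =====
-- helper 'comb(m)' of B: iterative multiplicative binomial coefficient
def pvCombB (n : Int) (m : Int) : Int :=
  (PySem.List.pyRange 0 m 1).foldl (fun c t => PySem.Int.floordiv (c * (n - t)) (t + 1)) 1

def paintingPlan_alt (n : Int) (k : Int) : Int :=
  if k = n * n then 1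
  else
    (PySem.List.pyRange 0 (n + 1) 1).foldl (fun total i =>
      let den := n - i
      let num := k - i * n
      if den ≠ 0 ∧ PySem.Int.mod num den = 0 then
        let j := PySem.Int.floordiv num den
        if 0 ≤ j ∧ j ≤ n then total + pvCombB n i * pvCombB n j else total
      else total) 0

-- ===== PRECONDITION & SPEC =====
def Spec_paintingPlan (n : Int) (k : Int) (out : Int) : Prop := out = paintingPlan_alt n k
instance (n : Int) (k : Int) (out : Int) : Decidable (Spec_paintingPlan n k out) := by unfold Spec_paintingPlan; infer_instance

-- ===== CLAIM (what is proved, stated in full; the proofs are below) =====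
def Claim_equal_paintingPlan : Prop := ∀ (n : Int) (k : Int), Dom_paintingPlan n k → Spec_paintingPlan n k (paintingPlan n k)

-- ===== LEMMAS AND PROOFS =====
lemma pv_foldl_mul (l : List Int) (a : Int) : l.foldl (fun x y => x * y) a = a * l.prod := by
  induction l generalizing a with
  | nil => simp
  | cons x t ih => simp only [List.foldl_cons, ih, List.prod_cons]; ring

lemma pv_prod_fact (M : Nat) :
    (PySem.List.pyRange 1 ((M : Int) + 1) 1).prod = (M.factorial : Int) := by
  induction M with
  | zero =>
      rw [show ((0:Nat):Int) + 1 = 1 by norm_num, PySem.List.pyRange_one_eq_nil le_rfl]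
      simp
  | succ M ih =>
      rw [show ((M+1:Nat):Int) + 1 = ((M:Int) + 1) + 1 by push_cast; ring,
        PySem.List.pyRange_one_succ_right (by omega)]
      rw [List.prod_append, ih]
      simp [Nat.factorial_succ]
      ring

lemma pv_prod_desc (M : Nat) : ∀ (N : Nat), M ≤ N →
    (PySem.List.pyRange (N : Int) ((N : Int) - M) (-1)).prod = (N.descFactorial M : Int) := by
  induction M with
  | zero =>
      intro N _
      rw [show ((N:Int) - (0:Nat)) = (N:Int) by norm_num,
        PySem.List.pyRange_neg_one_eq_nil le_rfl]
      simp
  | succ M ih =>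
      intro N hMN
      obtain ⟨N', rfl⟩ : ∃ N', N = N' + 1 := ⟨N - 1, by omega⟩
      rw [PySem.List.pyRange_neg_one_cons (by push_cast; omega)]
      rw [show ((N'+1:Nat):Int) - 1 = (N' : Int) by push_cast; ring]
      rw [show ((N'+1:Nat):Int) - ((M+1:Nat):Int) = (N' : Int) - (M:Nat) by push_cast; ring]
      rw [List.prod_cons, ih N' (by omega)]
      rw [Nat.succ_descFactorial_succ]
      push_cast
      ring

lemma pv_getA_eq_choose (N M : Nat) (h : M ≤ N) :
    pvGetA (N : Int) (M : Int) = (N.choose M : Int) := by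
  unfold pvGetA
  rw [pv_foldl_mul, pv_foldl_mul, one_mul, one_mul, pv_prod_fact, pv_prod_desc M N h,
    PySem.Int.floordiv_natCast, ← Nat.choose_eq_descFactorial_div_factorial]

lemma pv_combB_eq_choose (N M : Nat) (h : M ≤ N) :
    pvCombB (N : Int) (M : Int) = (N.choose M : Int) := by
  induction M with
  | zero =>
      unfold pvCombB
      rw [show ((0:Nat):Int) = 0 by norm_num, PySem.List.pyRange_one_eq_nil le_rfl]
      simp
  | succ M ih =>
      unfold pvCombB at *
      rw [show ((M+1:Nat):Int) = ((M:Int)) + 1 by push_cast; ring,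
        PySem.List.pyRange_one_succ_right (by omega), List.foldl_append, ih (by omega)]
      simp only [List.foldl_cons, List.foldl_nil]
      rw [show ((N:Int) - (M:Int)) = ((N - M : Nat) : Int) by push_cast [Nat.cast_sub (by omega : M ≤ N)]; ring]
      rw [show ((M:Int)) + 1 = ((M+1 : Nat) : Int) by push_cast; ring]
      rw [show ((N.choose M : Int)) * ((N - M : Nat) : Int) = ((N.choose M * (N - M) : Nat) : Int) by push_cast; ring]
      rw [PySem.Int.floordiv_natCast, ← Nat.choose_succ_right_eq, Nat.mul_div_cancel _ (by omega)]

lemma pv_getA_zero (n : Int) : pvGetA n 0 = 1 := by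
  unfold pvGetA
  simp only [show (0:Int) + 1 = 1 by norm_num, sub_zero]
  rw [PySem.List.pyRange_one_eq_nil le_rfl, PySem.List.pyRange_neg_one_eq_nil le_rfl]
  simp only [List.foldl_nil]
  rw [PySem.Int.floordiv_eq_ediv_of_pos (by norm_num)]
  norm_num

lemma pv_get_eq_comb (n m : Int) (h0 : 0 ≤ m) (h1 : m ≤ n) : pvGetA n m = pvCombB n m := by
  obtain ⟨M, rfl⟩ : ∃ M : Nat, m = (M : Int) := ⟨m.toNat, (Int.toNat_of_nonneg h0).symm⟩
  obtain ⟨N, rfl⟩ : ∃ N : Nat, n = (N : Int) := ⟨n.toNat, (Int.toNat_of_nonneg (by omega)).symm⟩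
  rw [pv_getA_eq_choose N M (by exact_mod_cast h1), pv_combB_eq_choose N M (by exact_mod_cast h1)]

lemma pv_filter_unique {P : Int → Prop} [DecidablePred P] (l : List Int) (hnd : l.Nodup)
    (j0 : Int) (hP : ∀ j, P j → j = j0) :
    l.filter (fun j => decide (P j)) = if j0 ∈ l ∧ P j0 then [j0] else [] := by
  induction l with
  | nil => simp
  | cons x t ih =>
      rw [List.nodup_cons] at hnd
      by_cases hx : P x
      · have hxj : x = j0 := hP x hx
        subst hxj
        have ht : t.filter (fun j => decide (P j)) = [] := by
          rw [ih hnd.2]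
          simp [hnd.1]
        simp [hx, ht]
      · rw [List.filter_cons_of_neg (by simpa using hx), ih hnd.2]
        by_cases hj : j0 ∈ t ∧ P j0
        · rw [if_pos hj, if_pos ⟨List.mem_cons_of_mem x hj.1, hj.2⟩]
        · have hnot : ¬ (j0 ∈ x :: t ∧ P j0) := by
            rintro ⟨hm, hPj⟩
            rcases List.mem_cons.mp hm with rfl | hm'
            · exact hx hPj
            · exact hj ⟨hm', hPj⟩
          rw [if_neg hj, if_neg hnot]

lemma pv_inner (n k i : Int) (hk : k ≠ n * n) (_hi0 : 0 ≤ i) (hi1 : i < n + 1) (C : Int) :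
    (PySem.List.pyRange 0 (n + 1) 1).foldl (fun count j =>
        if i * n + j * n - i * j = k then
          if i = 0 ∧ j ≠ 0 then count + pvGetA n j
          else if i ≠ 0 ∧ j = 0 then count + pvGetA n i
          else count + pvGetA n i * pvGetA n j
        else count) C
    = C + (if n - i ≠ 0 ∧ PySem.Int.mod (k - i * n) (n - i) = 0 then
             (if 0 ≤ PySem.Int.floordiv (k - i * n) (n - i) ∧ PySem.Int.floordiv (k - i * n) (n - i) ≤ n
              then pvGetA n i * pvGetA n (PySem.Int.floordiv (k - i * n) (n - i)) else 0)
           else 0) := by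
  have hcol : ∀ (count j : Int),
      (if i * n + j * n - i * j = k then
          if i = 0 ∧ j ≠ 0 then count + pvGetA n j
          else if i ≠ 0 ∧ j = 0 then count + pvGetA n i
          else count + pvGetA n i * pvGetA n j
        else count)
      = (if i * n + j * n - i * j = k then count + pvGetA n i * pvGetA n j else count) := by
    intro count j
    by_cases hi : i = 0
    · by_cases hj : j = 0 <;> simp [hi, hj, pv_getA_zero]
    · by_cases hj : j = 0 <;> simp [hi, hj, pv_getA_zero]
  rw [PySem.List.foldl_congr_mem _ _
      (fun count j => if i * n + j * n - i * j = k then count + pvGetA n i * pvGetA n j else count) _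
      (fun acc x _ => hcol acc x)]
  rw [PySem.List.foldl_ite_eq_foldl_filter (fun j => i * n + j * n - i * j = k)
      (fun count j => count + pvGetA n i * pvGetA n j)]
  rw [PySem.List.foldl_add]
  congr 1
  have hPeq : ∀ j : Int, (i * n + j * n - i * j = k) ↔ j * (n - i) = k - i * n := by
    intro j
    constructor <;> intro h <;> linear_combination h
  by_cases hni : n - i = 0
  · have hfe : (PySem.List.pyRange 0 (n + 1) 1).filter
        (fun j => decide (i * n + j * n - i * j = k)) = [] := by
      rw [List.filter_eq_nil_iff]
      intro j _
      simp only [decide_eq_true_eq]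
      intro hc
      rw [hPeq j] at hc
      have hin : i = n := by omega
      apply hk
      rw [hin] at hc
      have h0 : (0:Int) = k - n * n := by rw [← hc]; ring
      linarith
    rw [hfe]
    simp [hni]
  · have hden : 0 < n - i := by
      rcases lt_or_gt_of_ne hni with h | h
      · omega
      · omega
    by_cases hm : PySem.Int.mod (k - i * n) (n - i) = 0
    · set j0 := PySem.Int.floordiv (k - i * n) (n - i) with hj0def
      have hj0 : j0 * (n - i) = k - i * n := by
        have h := PySem.Int.floordiv_mul_add_mod (k - i * n) (n - i)
        rw [hm] at h
        linarith
      have hPiff : ∀ j : Int, (i * n + j * n - i * j = k) ↔ j = j0 := by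
        intro j
        rw [hPeq j]
        constructor
        · intro h
          have : j * (n - i) = j0 * (n - i) := by rw [hj0]; exact h
          exact mul_right_cancel₀ (by omega) this
        · rintro rfl
          exact hj0
      rw [pv_filter_unique (P := fun j => i * n + j * n - i * j = k) _
          (PySem.List.nodup_pyRange_one 0 (n + 1)) j0 (fun j hj => (hPiff j).mp hj)]
      by_cases hr : 0 ≤ j0 ∧ j0 ≤ n
      · rw [if_pos ⟨PySem.List.mem_pyRange_one.mpr ⟨hr.1, by omega⟩, (hPiff j0).mpr rfl⟩]
        rw [if_pos ⟨hni, hm⟩, if_pos hr]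
        simp
      · have hmemiff : ¬ (j0 ∈ PySem.List.pyRange 0 (n + 1) 1 ∧ i * n + j0 * n - i * j0 = k) := by
          rintro ⟨hmem, -⟩
          rw [PySem.List.mem_pyRange_one] at hmem
          exact hr ⟨hmem.1, by omega⟩
        rw [if_neg hmemiff, if_pos ⟨hni, hm⟩, if_neg hr]
        simp
    · have hfe : (PySem.List.pyRange 0 (n + 1) 1).filter
          (fun j => decide (i * n + j * n - i * j = k)) = [] := by
        rw [List.filter_eq_nil_iff]
        intro j _
        simp only [decide_eq_true_eq]
        intro hc
        apply hm
        rw [PySem.Int.mod_eq_zero_iff_dvd]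
        exact ⟨j, by linear_combination -(hPeq j).mp hc⟩
      rw [hfe]
      simp [hm]

lemma pv_main (n k : Int) : paintingPlan n k = paintingPlan_alt n k := by
  unfold paintingPlan paintingPlan_alt
  by_cases hk : k = n * n
  · simp [hk]
  · rw [if_neg hk, if_neg hk]
    apply PySem.List.foldl_congr_mem
    intro acc i hi
    rw [PySem.List.mem_pyRange_one] at hi
    rw [pv_inner n k i hk hi.1 hi.2]
    dsimp only
    by_cases hden : n - i ≠ 0 ∧ PySem.Int.mod (k - i * n) (n - i) = 0
    · rw [if_pos hden, if_pos hden]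
      by_cases hr : 0 ≤ PySem.Int.floordiv (k - i * n) (n - i) ∧
          PySem.Int.floordiv (k - i * n) (n - i) ≤ n
      · rw [if_pos hr, if_pos hr]
        rw [pv_get_eq_comb n i hi.1 (by omega), pv_get_eq_comb n _ hr.1 hr.2]
      · rw [if_neg hr, if_neg hr]
        ring
    · rw [if_neg hden, if_neg hden]
      ring

-- ===== VERDICT (by name: the statement is the Claim_ definition above) =====
theorem paintingPlan_spec : Claim_equal_paintingPlan := by
  intro n k _
  show paintingPlan n k = paintingPlan_alt n k
  exact pv_main n k
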